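-- pv_equiv track=rewrite | github.com/anonymousloger/Python | Cross Sequence.py | solve
-- ===== SOURCE A (Python) =====
-- def solve (N, A, K):
--     if K-1 <= N:
--         return 0
--     res = {}
--     for a in A:
--         for b in A:
--             ans = abs(a-b)
--             if ans in res:
--                 res[ans] += 1
--             else:
--                 res[ans] = 1
--     curr = 0
--     for a in sorted(res):
--         curr += (res[a])
--         if K-1 < curr:
--             return a
-- ===== SOURCE B (Python) =====
-- def solve(N, A, K):
--     if K - 1 <= N:
--         return 0
--     diffs = sorted(abs(a - b) for a in A for b in A)
--     return diffs[K - 1]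
-- ===== Notes on version B (the rewrite author's own statement) =====
-- stated objective: simpler
-- what changed: A builds a dict counting each distinct pairwise difference and then scans the sorted keys accumulating counts until the running total exceeds K-1, while B flattens all pairwise absolute differences into one list, sorts it, and indexes it at K-1; Pre_ excludes inputs where A's key scan falls off the end returning None (K-1 > N and K-1 >= len(A)^2), and the meaningless negative rank corner (K-1 > N and K-1 < 0) where A's accidental 0 and B's negative-index wraparound value are equally unspecified.
-- outside the precondition, e.g. on solve(-5, [1, 3], 0): A returns 0, B returns 2
import Mathlib
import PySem

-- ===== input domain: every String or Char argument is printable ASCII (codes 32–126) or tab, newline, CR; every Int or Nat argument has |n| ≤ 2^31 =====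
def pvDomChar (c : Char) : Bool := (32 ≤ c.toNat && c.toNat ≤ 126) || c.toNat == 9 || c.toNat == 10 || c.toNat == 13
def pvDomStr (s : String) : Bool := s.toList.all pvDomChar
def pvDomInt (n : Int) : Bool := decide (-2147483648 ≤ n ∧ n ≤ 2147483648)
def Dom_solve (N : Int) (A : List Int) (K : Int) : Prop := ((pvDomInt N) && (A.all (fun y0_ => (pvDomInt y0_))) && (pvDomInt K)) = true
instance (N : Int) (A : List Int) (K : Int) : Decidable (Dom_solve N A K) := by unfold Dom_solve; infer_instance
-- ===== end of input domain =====

-- B replaces A's per-distinct-difference counter dict and cumulative scan of its sorted keys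
-- by sorting the flat list of all pairwise absolute differences and indexing it at K-1 (objective: simpler).

-- ===== PORT A =====
-- 'if ans in res: res[ans] += 1 else: res[ans] = 1'
def solveStep (d : PySem.Dict Int Int) (ans : Int) : PySem.Dict Int Int :=
  if d.contains ans then d.insert ans (d.getD ans 0 + 1) else d.insert ans 1

-- 'for a in sorted(res): curr += res[a]; if K-1 < curr: return a'
-- (res[a] is always present here, ported as getD a 0; falling off the loop is Python's
--  'return None', excluded by Pre_solve, ported as 0)
def solveSelect (K : Int) (d : PySem.Dict Int Int) : Int → List Int → Int
  | _, [] => 0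
  | curr, a :: rest =>
    let curr' := curr + d.getD a 0
    if K - 1 < curr' then a else solveSelect K d curr' rest

def solve (N : Int) (A : List Int) (K : Int) : Int :=
  if K - 1 ≤ N then 0
  else
    let res := A.foldl (fun d a => A.foldl (fun d b => solveStep d |a - b|) d) PySem.Dict.empty
    solveSelect K res 0 (PySem.List.sorted res.keys (fun x => x) false)

-- ===== PORT B =====
def solve_alt (N : Int) (A : List Int) (K : Int) : Int :=
  if K - 1 ≤ N then 0
  else
    let diffs := PySem.List.sorted (A.flatMap (fun a => A.map (fun b => |a - b|))) (fun x => x) false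
    (PySem.List.pyGet? diffs (K - 1)).getD 0   -- none = IndexError, excluded by Pre_solve

-- ===== PRECONDITION & SPEC =====
-- Pre_solve excludes (i) inputs where A's key scan falls off the end and Python returns None
-- (K-1 > N and K-1 ≥ len(A)^2; B raises IndexError there), and (ii) the meaningless negative
-- rank corner K-1 > N with K-1 < 0, where A's accidental 0 and B's negative-index wraparound
-- value are equally unspecified.
def Pre_solve (N : Int) (A : List Int) (K : Int) : Prop :=
  K - 1 ≤ N ∨ (0 ≤ K - 1 ∧ K - 1 < (A.length : Int) * A.length)
instance (N : Int) (A : List Int) (K : Int) : Decidable (Pre_solve N A K) := by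
  unfold Pre_solve; infer_instance
def pvWitness_solve : Int × List Int × Int := (0, [1, 2], 4)

def Spec_solve (N : Int) (A : List Int) (K : Int) (out : Int) : Prop := out = solve_alt N A K
instance (N : Int) (A : List Int) (K : Int) (out : Int) : Decidable (Spec_solve N A K out) := by
  unfold Spec_solve; infer_instance

-- ===== CLAIM (what is proved, stated in full; the proofs are below) =====
def Claim_equal_solve : Prop := ∀ (N : Int) (A : List Int) (K : Int),
  Dom_solve N A K → Pre_solve N A K → Spec_solve N A K (solve N A K)

-- ===== LEMMAS AND PROOFS =====

-- the flat list of all pairwise absolute differences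
def pvDiffs (A : List Int) : List Int := A.flatMap (fun a => A.map (fun b => |a - b|))

-- the sorted multiset, written as sorted distinct values with their multiplicities
def pvBlocks (D : List Int) (ks : List Int) : List Int :=
  ks.flatMap (fun v => List.replicate (D.count v) v)

theorem pvStep_eq (d : PySem.Dict Int Int) (x : Int) :
    solveStep d x = d.insert x (d.getD x 0 + 1) := by
  unfold solveStep
  by_cases h : d.contains x = true
  · simp [h]
  · have h' : d.contains x = false := by
      cases hc : d.contains x
      · rfl
      · exact absurd hc h
    have hz : d.getD x 0 = 0 := PySem.Dict.getD_of_not_contains d 0 h'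
    simp [h', hz]

theorem pvRes_eq (A : List Int) :
    A.foldl (fun d a => A.foldl (fun d b => solveStep d |a - b|) d) PySem.Dict.empty
      = PySem.Dict.counter (pvDiffs A) := by
  simp only [pvStep_eq]
  rw [← PySem.Dict.foldl_insert_getD_add_one_eq_counter]
  unfold pvDiffs
  rw [List.foldl_flatMap]
  simp [List.foldl_map]

theorem pvMem_blocks {D ks : List Int} {x : Int} :
    x ∈ pvBlocks D ks ↔ x ∈ ks ∧ 0 < D.count x := by
  unfold pvBlocks
  simp only [List.mem_flatMap, List.mem_replicate]
  constructor
  · rintro ⟨v, hv, hn, rfl⟩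
    exact ⟨hv, Nat.pos_of_ne_zero hn⟩
  · rintro ⟨hx, hc⟩
    exact ⟨x, hx, Nat.pos_iff_ne_zero.mp hc, rfl⟩

theorem pvCount_blocks (D : List Int) (ks : List Int) (hnd : ks.Nodup) (x : Int) :
    (pvBlocks D ks).count x = if x ∈ ks then D.count x else 0 := by
  induction ks with
  | nil => simp [pvBlocks]
  | cons k t ih =>
    have hk : k ∉ t := (List.nodup_cons.mp hnd).1
    have ht : t.Nodup := (List.nodup_cons.mp hnd).2
    have hblk : pvBlocks D (k :: t) = List.replicate (D.count k) k ++ pvBlocks D t := by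
      simp [pvBlocks]
    rw [hblk, List.count_append, ih ht]
    by_cases hxk : x = k
    · subst hxk
      simp [hk, List.count_replicate_self]
    · have h0 : (List.replicate (D.count k) k).count x = 0 :=
        List.count_eq_zero_of_not_mem (by simp [List.mem_replicate, hxk])
      simp [h0, hxk, List.mem_cons]

theorem pvBlocks_pairwise (D : List Int) :
    ∀ ks : List Int, ks.Pairwise (fun a b => a < b) →
      (pvBlocks D ks).Pairwise (fun a b => a ≤ b) := by
  intro ks
  induction ks with
  | nil => intro _; simp [pvBlocks]
  | cons k t ih =>
    intro hlt
    have hblk : pvBlocks D (k :: t) = List.replicate (D.count k) k ++ pvBlocks D t := by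
      simp [pvBlocks]
    rw [hblk, List.pairwise_append]
    refine ⟨List.pairwise_replicate.mpr (Or.inr le_rfl), ih hlt.of_cons, ?_⟩
    intro a ha b hb
    have hak : a = k := List.eq_of_mem_replicate ha
    have hbt : b ∈ t := (pvMem_blocks.mp hb).1
    have := (List.pairwise_cons.mp hlt).1 b hbt
    omega

theorem pvSorted_decomp (D : List Int) :
    PySem.List.sorted D (fun x => x) false
      = pvBlocks D (PySem.List.sorted (PySem.Set.ofList D) (fun x => x) false) := by
  set ks := PySem.List.sorted (PySem.Set.ofList D) (fun x => x) false with hks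
  have hmemk : ∀ x : Int, x ∈ ks ↔ x ∈ D := by
    intro x
    rw [hks, PySem.List.mem_sorted, PySem.Set.mem_ofList]
  have hnd : ks.Nodup := by
    have := PySem.List.sorted_perm (PySem.Set.ofList D) (fun x : Int => x) false
    exact this.nodup_iff.mpr (PySem.Set.nodup_ofList D)
  apply PySem.List.sorted_id_eq_of_perm_of_pairwise
  · rw [List.perm_iff_count]
    intro x
    rw [pvCount_blocks D ks hnd x]
    by_cases hx : x ∈ D
    · simp [(hmemk x).mpr hx]
    · have hxk : x ∉ ks := fun h => hx ((hmemk x).mp h)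
      simp [hxk, List.count_eq_zero_of_not_mem hx]
  · exact pvBlocks_pairwise D ks (hks ▸ PySem.List.sorted_ofList_pairwise_lt D)

theorem pvSelect_eq (D : List Int) (K : Int) :
    ∀ (ks : List Int) (curr : Int),
      0 ≤ K - 1 - curr → K - 1 - curr < ((pvBlocks D ks).length : Int) →
      solveSelect K (PySem.Dict.counter D) curr ks
        = (pvBlocks D ks).getD (K - 1 - curr).toNat 0 := by
  intro ks
  induction ks with
  | nil =>
    intro curr h1 h2
    simp [pvBlocks] at h2
    omega
  | cons a t ih =>
    intro curr h1 h2
    have hc : (PySem.Dict.counter D).getD a 0 = (D.count a : Int) :=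
      PySem.Dict.getD_counter D a
    have hblk : pvBlocks D (a :: t) = List.replicate (D.count a) a ++ pvBlocks D t := by
      simp [pvBlocks]
    simp only [solveSelect, hc]
    by_cases hcase : K - 1 < curr + (D.count a : Int)
    · rw [if_pos hcase, hblk]
      have hlt : (K - 1 - curr).toNat < D.count a := by omega
      rw [List.getD_eq_getElem?_getD, List.getElem?_append_left (by simpa using hlt)]
      simp [hlt]
    · rw [if_neg hcase]
      have hlen : ((pvBlocks D (a :: t)).length : Int)
          = (D.count a : Int) + ((pvBlocks D t).length : Int) := by
        rw [hblk]; push_cast [List.length_append, List.length_replicate]; ring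
      have h1' : 0 ≤ K - 1 - (curr + (D.count a : Int)) := by omega
      have h2' : K - 1 - (curr + (D.count a : Int)) < ((pvBlocks D t).length : Int) := by
        omega
      rw [ih (curr + (D.count a : Int)) h1' h2', hblk]
      rw [List.getD_eq_getElem?_getD, List.getD_eq_getElem?_getD,
        List.getElem?_append_right (by simp; omega)]
      have hidx : (K - 1 - curr).toNat - (List.replicate (D.count a) a).length
          = (K - 1 - (curr + (D.count a : Int))).toNat := by
        simp
        omega
      rw [hidx]

theorem pvDiffs_length (A : List Int) : (pvDiffs A).length = A.length * A.length := by
  simp [pvDiffs]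

-- ===== VERDICT (by name: the statement is the Claim_ definition above) =====
theorem solve_spec : Claim_equal_solve := by
  intro N A K _ hpre
  unfold Spec_solve
  by_cases hK : K - 1 ≤ N
  · simp [solve, solve_alt, hK]
  · obtain ⟨hk0, hk1⟩ : 0 ≤ K - 1 ∧ K - 1 < (A.length : Int) * A.length := by
      rcases hpre with h | h
      · exact absurd h hK
      · exact h
    have hA : solve N A K = solveSelect K (PySem.Dict.counter (pvDiffs A)) 0
        (PySem.List.sorted (PySem.Set.ofList (pvDiffs A)) (fun x => x) false) := by
      simp only [solve, if_neg hK, pvRes_eq, PySem.Dict.keys_counter]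
    have hB : solve_alt N A K
        = (PySem.List.pyGet? (PySem.List.sorted (pvDiffs A) (fun x => x) false) (K - 1)).getD 0 := by
      simp only [solve_alt, if_neg hK]
      rfl
    rw [hA, hB]
    set D := pvDiffs A with hD
    set ks := PySem.List.sorted (PySem.Set.ofList D) (fun x : Int => x) false with hks
    have hdec := pvSorted_decomp D
    have hlenD : (D.length : Int) = (A.length : Int) * A.length := by
      rw [hD, pvDiffs_length]; push_cast; ring
    have hlenB : ((pvBlocks D ks).length : Int) = (D.length : Int) := by
      rw [← hdec]
      simp [PySem.List.length_sorted]
    have hsel := pvSelect_eq D K ks 0 (by omega) (by omega)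
    simp only [sub_zero] at hsel
    rw [hsel, ← hdec]
    have hlt : (K - 1).toNat < (PySem.List.sorted D (fun x => x) false).length := by
      have hl : ((PySem.List.sorted D (fun x => x) false).length : Int) = (D.length : Int) := by
        simp [PySem.List.length_sorted]
      omega
    rw [PySem.List.pyGet?_eq_some_getElem _ hk0 (by omega)]
    rw [List.getD_eq_getElem?_getD, List.getElem?_eq_getElem hlt]
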